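-- pv_equiv track=rewrite | github.com/ericmerle3789/Collatz-Junction-Theorem | scripts/exploration/sp9_voie4_bypass.py | corrsum_mod_p
-- ===== SOURCE A (Python) =====
-- def corrsum_mod_p(A, k, p):
--     """Calcule corrSum(A) mod p.
--     A = (a_1, ..., a_{k-1}) trié croissant.
--     corrSum = Σ_{m=0}^{k-2} 3^m · 2^{a_{m+1}} mod p
--     """
--     s = 0
--     pow3 = 1
--     for m in range(k - 1):
--         a = A[m]  # a_{m+1} (indexation 0-based = m)
--         s = (s + pow3 * pow(2, a, p)) % p
--         pow3 = (pow3 * 3) % p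
--     return s
-- ===== SOURCE B (Python) =====
-- def corrsum_mod_p(A, k, p):
--     """Horner's scheme on the polynomial in 3: same sum, traversed top-down."""
--     s = 0
--     for m in range(k - 2, -1, -1):
--         s = (s * 3 + pow(2, A[m], p)) % p
--     return s
-- ===== Notes on version B (the rewrite author's own statement) =====
-- stated objective: alternative
-- what changed: Replaces the left-to-right sum that maintains a running power-of-3 coefficient with Horner's scheme: iterate indices from k-2 down to 0 and fold s = (s*3 + pow(2, A[m], p)) % p, so the explicit pow3 accumulator disappears and the maintained invariant is a Horner prefix instead of coefficient-times-power partial sums.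
import Mathlib
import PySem

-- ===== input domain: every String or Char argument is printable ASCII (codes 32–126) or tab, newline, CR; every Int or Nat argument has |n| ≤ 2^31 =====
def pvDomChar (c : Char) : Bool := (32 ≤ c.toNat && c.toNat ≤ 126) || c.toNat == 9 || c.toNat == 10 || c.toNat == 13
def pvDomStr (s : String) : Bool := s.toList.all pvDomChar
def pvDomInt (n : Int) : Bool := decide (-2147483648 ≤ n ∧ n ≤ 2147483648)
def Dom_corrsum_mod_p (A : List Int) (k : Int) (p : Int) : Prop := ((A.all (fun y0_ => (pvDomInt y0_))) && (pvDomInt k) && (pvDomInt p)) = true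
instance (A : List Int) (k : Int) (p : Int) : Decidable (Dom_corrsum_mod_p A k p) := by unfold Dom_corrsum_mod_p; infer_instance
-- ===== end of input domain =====

-- B replaces A's running pow3-coefficient sum with Horner's scheme iterating indices top-down; same cost, different maintained invariant.


-- ===== PORT A =====
-- Python's three-argument pow(2, a, p): for a ≥ 0 it is PySem.Int.powMod; for a < 0 (allowed
-- only when p is odd — Pre_ excludes the even case, where Python raises ValueError) it is the
-- modular power of 2's inverse (|p|+1)/2 mod |p|, exact on p ≠ 0 with 2 invertible mod p.
def pyPow2Mod (a p : Int) : Int :=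
  if 0 ≤ a then PySem.Int.powMod 2 a.toNat p
  else PySem.Int.powMod (((p.natAbs + 1) / 2 : Nat) : Int) (-a).toNat p

def corrsum_mod_p (A : List Int) (k : Int) (p : Int) : Int :=
  ((PySem.List.pyRange 0 (k - 1) 1).foldl
    (fun (st : Int × Int) m =>
      let a := PySem.List.pyGetD A m 0
      (PySem.Int.mod (st.1 + st.2 * pyPow2Mod a p) p, PySem.Int.mod (st.2 * 3) p))
    (0, 1)).1

-- ===== PORT B =====
def corrsum_mod_p_alt (A : List Int) (k : Int) (p : Int) : Int :=
  (PySem.List.pyRange (k - 2) (-1) (-1)).foldl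
    (fun s m => PySem.Int.mod (s * 3 + pyPow2Mod (PySem.List.pyGetD A m 0) p) p) 0

-- ===== PRECONDITION & SPEC =====
-- Exactly where Python A returns: the loop indices stay in range, and if the loop runs at all
-- then p ≠ 0 (pow/% by 0 raises) and a negative exponent only occurs with p odd (else pow raises ValueError).
def Pre_corrsum_mod_p (A : List Int) (k : Int) (p : Int) : Prop :=
  k ≤ (A.length : Int) + 1 ∧
  (1 < k → p ≠ 0 ∧ (2 ∣ p → ∀ x ∈ A.take (k - 1).toNat, 0 ≤ x))
instance (A : List Int) (k : Int) (p : Int) : Decidable (Pre_corrsum_mod_p A k p) := by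
  unfold Pre_corrsum_mod_p; infer_instance

def pvWitness_corrsum_mod_p : List Int × Int × Int := ([1, 3, 4], 3, 7)

def Spec_corrsum_mod_p (A : List Int) (k : Int) (p : Int) (out : Int) : Prop := out = corrsum_mod_p_alt A k p
instance (A : List Int) (k : Int) (p : Int) (out : Int) : Decidable (Spec_corrsum_mod_p A k p out) := by unfold Spec_corrsum_mod_p; infer_instance

-- ===== CLAIM (what is proved, stated in full; the proofs are below) =====
def Claim_equal_corrsum_mod_p : Prop := ∀ (A : List Int) (k : Int) (p : Int), Dom_corrsum_mod_p A k p → Pre_corrsum_mod_p A k p → Spec_corrsum_mod_p A k p (corrsum_mod_p A k p)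

-- ===== LEMMAS AND PROOFS =====

-- the m-th term pow(2, A[m], p) (opaque for the equivalence proof)
def pvTerm (A : List Int) (p : Int) (m : Int) : Int := pyPow2Mod (PySem.List.pyGetD A m 0) p

-- the exact partial sum Σ_{m<n} 3^m · term m
def pvSum (A : List Int) (p : Int) : Nat → Int
  | 0 => 0
  | n + 1 => pvSum A p n + 3 ^ n * pvTerm A p (n : Int)

-- fmod only depends on the residue class
theorem pvFmodCongr (a b p : Int) (h : a % p = b % p) : Int.fmod a p = Int.fmod b p := by
  have hd : (p ∣ a) ↔ (p ∣ b) := by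
    rw [Int.dvd_iff_emod_eq_zero, Int.dvd_iff_emod_eq_zero, h]
  rw [Int.fmod_eq_emod, Int.fmod_eq_emod, h]
  by_cases h0 : 0 ≤ p <;> simp [h0, hd]

theorem pvFmodModEq (x p : Int) : Int.fmod x p % p = x % p := by
  rw [Int.fmod_def, sub_eq_add_neg, ← mul_neg, Int.add_mul_emod_self_left]

-- the key step congruence: reducing either summand mod p first does not change the fmod
theorem pvFmodAddMul (x y c p : Int) :
    Int.fmod (Int.fmod x p + Int.fmod y p * c) p = Int.fmod (x + y * c) p := by
  apply pvFmodCongr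
  have Hx : Int.ModEq p (Int.fmod x p) x := pvFmodModEq x p
  have Hy : Int.ModEq p (Int.fmod y p) y := pvFmodModEq y p
  exact Hx.add (Hy.mul_right c)

-- characterization of A's loop state after n iterations
theorem pvAChar (A : List Int) (p : Int) (n : Nat) :
    ((PySem.List.pyRange 0 (n : Int) 1).foldl
      (fun (st : Int × Int) m =>
        let a := PySem.List.pyGetD A m 0
        (PySem.Int.mod (st.1 + st.2 * pyPow2Mod a p) p, PySem.Int.mod (st.2 * 3) p))
      (0, 1)) =
    (Int.fmod (pvSum A p n) p, if n = 0 then 1 else Int.fmod ((3 : Int) ^ n) p) := by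
  induction n with
  | zero =>
      rw [PySem.List.pyRange_one_eq_nil (by omega)]
      simp [pvSum, Int.fmod]
  | succ n ih =>
      rw [show ((n + 1 : Nat) : Int) = (n : Int) + 1 by push_cast; ring,
          PySem.List.pyRange_one_succ_right (by positivity), List.foldl_append, ih]
      simp only [List.foldl_cons, List.foldl_nil, PySem.Int.mod, Prod.mk.injEq]
      constructor
      · -- sum component
        cases n with
        | zero => simp [pvSum, pvTerm, Int.fmod]
        | succ j =>
            simp only [Nat.succ_ne_zero, ite_false, pvSum]
            exact pvFmodAddMul (pvSum A p (j + 1)) (3 ^ (j + 1)) (pvTerm A p ((j + 1 : Nat) : Int)) p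
      · -- pow3 component
        cases n with
        | zero => simp [pow_one]
        | succ j =>
            simp only [Nat.succ_ne_zero, ite_false]
            have h := pvFmodAddMul 0 (3 ^ (j + 1)) 3 p
            simp only [Int.zero_fmod, zero_add] at h
            rw [h, ← pow_succ]

-- characterization of B's Horner loop, accumulator generalized
theorem pvBChar (A : List Int) (p : Int) (n : Nat) (hn : 1 ≤ n) (s : Int) :
    ((PySem.List.pyRange ((n : Int) - 1) (-1) (-1)).foldl
      (fun s m => PySem.Int.mod (s * 3 + pyPow2Mod (PySem.List.pyGetD A m 0) p) p) s) =
    Int.fmod (s * 3 ^ n + pvSum A p n) p := by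
  induction n generalizing s with
  | zero => omega
  | succ n ih =>
      rw [PySem.List.pyRange_neg_one_cons (by omega), List.foldl_cons]
      cases Nat.eq_zero_or_pos n with
      | inl h0 =>
          subst h0
          rw [show ((0 + 1 : Nat) : Int) - 1 - 1 = -1 by norm_num,
              PySem.List.pyRange_neg_one_eq_nil (by omega), List.foldl_nil]
          simp [pvSum, pvTerm, PySem.Int.mod, pow_one]
      | inr hpos =>
          rw [show ((n + 1 : Nat) : Int) - 1 - 1 = (n : Int) - 1 by push_cast; ring,
              show ((n + 1 : Nat) : Int) - 1 = (n : Int) by push_cast; ring]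
          rw [ih hpos]
          simp only [PySem.Int.mod, pvSum]
          rw [show pyPow2Mod (PySem.List.pyGetD A ((n : Nat) : Int) 0) p = pvTerm A p ((n : Nat) : Int) from rfl]
          have HX : Int.ModEq p (Int.fmod (s * 3 + pvTerm A p (n : Int)) p)
              (s * 3 + pvTerm A p (n : Int)) := pvFmodModEq _ p
          rw [pvFmodCongr _ _ p ((HX.mul_right ((3 : Int) ^ n)).add_right (pvSum A p n))]
          congr 1
          ring

-- ===== VERDICT (by name: the statement is the Claim_ definition above) =====
theorem corrsum_mod_p_spec : Claim_equal_corrsum_mod_p := by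
  intro A k p _ _
  unfold Spec_corrsum_mod_p corrsum_mod_p corrsum_mod_p_alt
  by_cases hk : k ≤ 1
  · rw [PySem.List.pyRange_one_eq_nil (by omega), PySem.List.pyRange_neg_one_eq_nil (by omega)]
    rfl
  · have hn : ((k - 1).toNat : Int) = k - 1 := by omega
    have h1 : 1 ≤ (k - 1).toNat := by omega
    rw [show k - 1 = ((k - 1).toNat : Int) from hn.symm,
        show k - 2 = ((k - 1).toNat : Int) - 1 from by omega]
    rw [pvAChar, pvBChar A p _ h1 0]
    simp
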